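-- pv_equiv track=rewrite | github.com/MrBrantCode/unitest_baseline | mut_generate/mist_train_cf/cf_34589/solution.py | find_best_observation_point
-- ===== SOURCE A (Python) =====
-- from typing import List, Tuple
--
-- def find_best_observation_point(grid: List[str]) -> Tuple[int, int]:
--     max_observed = 0
--     best_point = (0, 0)
--     rows, cols = len(grid), len(grid[0])
--
--     for i in range(rows):
--         for j in range(cols):
--             if grid[i][j] == '.':
--                 observed = sum(grid[i][k] == '#' for k in range(cols))
--                 observed += sum(grid[k][j] == '#' for k in range(rows))
--
--                 k, l = i, j
--                 while k < rows and l < cols: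
--                     observed += grid[k][l] == '#'
--                     k += 1
--                     l += 1
--
--                 k, l = i, j
--                 while k < rows and l >= 0:
--                     observed += grid[k][l] == '#'
--                     k += 1
--                     l -= 1
--
--                 if observed > max_observed:
--                     max_observed = observed
--                     best_point = (j, i)
--
--     return best_point
-- ===== SOURCE B (Python) =====
-- def find_best_observation_point(grid):
--     rows, cols = len(grid), len(grid[0])
--
--     # locate all '.' cells first (cheap row membership test skips dot-free rows)
--     dots = []
--     for i in range(rows):
--         row = grid[i]
--         if '.' in row:
--             for j in range(cols):
--                 if row[j] == '.':
--                     dots.append((i, j))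
--     if not dots:
--         return (0, 0)
--
--     # O(1)-per-cell score ingredients: row sums, column sums, and bottom-up
--     # suffix-sum DP tables for the two downward diagonals
--     row_sums = [sum(c == '#' for c in row[:cols]) for row in grid]
--     col_sums = [sum(grid[i][j] == '#' for i in range(rows)) for j in range(cols)]
--     d1 = [None] * rows  # down-right diagonal suffix counts
--     d2 = [None] * rows  # down-left diagonal suffix counts
--     for i in range(rows - 1, -1, -1):
--         nxt1 = d1[i + 1] if i + 1 < rows else []
--         nxt2 = d2[i + 1] if i + 1 < rows else []
--         d1[i] = [(grid[i][j] == '#') + (nxt1[j + 1] if j + 1 < len(nxt1) else 0)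
--                  for j in range(cols)]
--         d2[i] = [(grid[i][j] == '#') + (nxt2[j - 1] if (j >= 1 and nxt2) else 0)
--                  for j in range(cols)]
--
--     max_observed = 0
--     best_point = (0, 0)
--     for i, j in dots:
--         observed = row_sums[i] + col_sums[j] + d1[i][j] + d2[i][j]
--         if observed > max_observed:
--             max_observed = observed
--             best_point = (j, i)
--     return best_point
-- ===== Notes on version B (the rewrite author's own statement) =====
-- stated objective: faster
-- what changed: B first collects the '.' cells (skipping dot-free rows via a C-level membership test, returning early if there are none) and then scores each one in O(1) from precomputed row sums, column sums and bottom-up suffix-sum DP tables for the two downward diagonals, instead of A's rescan of the whole row, column and diagonals per cell.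
import Mathlib
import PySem

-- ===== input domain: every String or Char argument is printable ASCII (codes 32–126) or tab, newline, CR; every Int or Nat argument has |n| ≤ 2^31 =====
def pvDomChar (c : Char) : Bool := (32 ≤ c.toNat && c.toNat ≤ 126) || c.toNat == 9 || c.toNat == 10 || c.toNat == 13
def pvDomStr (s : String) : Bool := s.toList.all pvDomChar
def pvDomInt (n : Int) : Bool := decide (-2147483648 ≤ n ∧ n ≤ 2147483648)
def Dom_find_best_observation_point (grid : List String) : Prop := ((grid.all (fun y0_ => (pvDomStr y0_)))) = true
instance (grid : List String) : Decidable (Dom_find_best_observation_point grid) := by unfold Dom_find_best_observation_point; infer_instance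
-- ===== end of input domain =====

-- B replaces A's per-cell rescans of row/column/diagonals by precomputed row/column sums and
-- bottom-up suffix-sum DP tables for the two downward diagonals (O(1) per cell).

-- shared low-level cell access: grid[i][j], default ' ' (in range on every input Pre_ admits)
def pvChAt (g : List String) (i j : Nat) : Char := ((g.getD i "").toList.getD j ' ')
-- grid[i][j] == '#' summed as an int
def pvHash (g : List String) (i j : Nat) : Int := if pvChAt g i j = '#' then 1 else 0

-- ===== PORT A =====
-- while k < rows and l < cols: observed += grid[k][l] == '#'; k += 1; l += 1
def pvDiagDR (g : List String) (rows cols : Nat) (k l : Nat) : Int :=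
  if _h : k < rows ∧ l < cols then pvHash g k l + pvDiagDR g rows cols (k+1) (l+1) else 0
termination_by rows - k
decreasing_by omega

-- while k < rows and l >= 0: observed += grid[k][l] == '#'; k += 1; l -= 1
def pvDiagDL (g : List String) (rows cols : Nat) (k : Nat) (l : Int) : Int :=
  if _h : k < rows ∧ 0 ≤ l then pvHash g k l.toNat + pvDiagDL g rows cols (k+1) (l-1) else 0
termination_by rows - k
decreasing_by omega

-- observed = row sum + column sum + the two downward diagonal scans
def pvObservedA (g : List String) (rows cols i j : Nat) : Int :=
  ((List.range cols).map (fun k => pvHash g i k)).sum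
  + ((List.range rows).map (fun k => pvHash g k j)).sum
  + pvDiagDR g rows cols i j + pvDiagDL g rows cols i (j : Int)

-- the body of the double loop: state = (max_observed, best_point)
def pvStepA (g : List String) (rows cols : Nat) (s : Int × (Int × Int)) (i j : Nat) :
    Int × (Int × Int) :=
  if pvChAt g i j = '.' then
    let obs := pvObservedA g rows cols i j
    if obs > s.1 then (obs, ((j : Int), (i : Int))) else s
  else s

-- range(rows)/range(cols) with rows, cols = lengths (≥ 0) is exactly List.range
def find_best_observation_point (grid : List String) : Int × Int :=
  let rows := grid.length
  let cols := (grid.headD "").length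
  ((List.range rows).foldl
    (fun s i => (List.range cols).foldl (fun s j => pvStepA grid rows cols s i j) s)
    ((0 : Int), ((0 : Int), (0 : Int)))).2

-- ===== PORT B =====
-- row_sums = [sum(c == '#' for c in row[:cols]) for row in grid]
def pvRowSums (g : List String) (cols : Nat) : List Int :=
  g.map (fun row => ((row.toList.take cols).map (fun c => if c = '#' then (1 : Int) else 0)).sum)

-- col_sums = [sum(grid[i][j] == '#' for i in range(rows)) for j in range(cols)]
def pvColSums (g : List String) (rows cols : Nat) : List Int :=
  (List.range cols).map (fun j => ((List.range rows).map (fun i => pvHash g i j)).sum)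

-- the d1 table built bottom-up (row i from row i+1); nxt1 = d1[i+1] if i+1 < rows else []
def pvD1From (g : List String) (rows cols : Nat) (i : Nat) : List (List Int) :=
  if _h : i < rows then
    let rest := pvD1From g rows cols (i+1)
    ((List.range cols).map (fun j => pvHash g i j + (rest.headD []).getD (j+1) 0)) :: rest
  else []
termination_by rows - i
decreasing_by omega

-- the d2 table built bottom-up; entry j uses nxt2[j-1] if j >= 1 and nxt2 else 0
def pvD2From (g : List String) (rows cols : Nat) (i : Nat) : List (List Int) :=
  if _h : i < rows then
    let rest := pvD2From g rows cols (i+1)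
    ((List.range cols).map (fun j =>
        pvHash g i j + (if j = 0 then 0 else (rest.headD []).getD (j-1) 0))) :: rest
  else []
termination_by rows - i
decreasing_by omega

-- the dot positions of row i; the row-membership test skips dot-free rows
def pvRowDots (g : List String) (cols i : Nat) : List (Nat × Nat) :=
  if '.' ∈ (g.getD i "").toList then
    ((List.range cols).filter (fun j => pvChAt g i j == '.')).map (fun j => (i, j))
  else []

-- dots = the '.' cells in row-major order
def pvDots (g : List String) (rows cols : Nat) : List (Nat × Nat) :=
  (List.range rows).flatMap (fun i => pvRowDots g cols i)

def find_best_observation_point_alt (grid : List String) : Int × Int :=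
  let rows := grid.length
  let cols := (grid.headD "").length
  let dots := pvDots grid rows cols
  if dots.isEmpty then (0, 0)
  else
    let rowS := pvRowSums grid cols
    let colS := pvColSums grid rows cols
    let d1 := pvD1From grid rows cols 0
    let d2 := pvD2From grid rows cols 0
    (dots.foldl (fun s ij =>
      let obs := rowS.getD ij.1 0 + colS.getD ij.2 0 + (d1.getD ij.1 []).getD ij.2 0
                 + (d2.getD ij.1 []).getD ij.2 0
      if obs > s.1 then (obs, ((ij.2 : Int), (ij.1 : Int))) else s)
      ((0 : Int), ((0 : Int), (0 : Int)))).2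

-- ===== PRECONDITION & SPEC =====
-- Pre_ excludes exactly the inputs on which the Python A raises IndexError: the empty grid
-- (grid[0]) and grids where some row is shorter than the first row (grid[k][j], j < cols).
def Pre_find_best_observation_point (grid : List String) : Prop :=
  grid ≠ [] ∧ ∀ s ∈ grid, (grid.headD "").length ≤ s.length
instance (grid : List String) : Decidable (Pre_find_best_observation_point grid) := by
  unfold Pre_find_best_observation_point; infer_instance

def pvWitness_find_best_observation_point : List String := [".#", "##"]

def Spec_find_best_observation_point (grid : List String) (out : Int × Int) : Prop :=
  out = find_best_observation_point_alt grid
instance (grid : List String) (out : Int × Int) :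
    Decidable (Spec_find_best_observation_point grid out) := by
  unfold Spec_find_best_observation_point; infer_instance

-- ===== CLAIM (what is proved, stated in full; the proofs are below) =====
def Claim_equal_find_best_observation_point : Prop :=
  ∀ (grid : List String), Dom_find_best_observation_point grid →
    Pre_find_best_observation_point grid →
    Spec_find_best_observation_point grid (find_best_observation_point grid)

-- ===== LEMMAS AND PROOFS =====

-- row sum over the truncated row equals the index-based row sum (missing chars contribute 0)
theorem pvRow_take_eq (l : List Char) (n : Nat) :
    ((l.take n).map (fun c => if c = '#' then (1 : Int) else 0)).sum
      = ((List.range n).map (fun k => if l.getD k ' ' = '#' then (1 : Int) else 0)).sum := by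
  induction n with
  | zero => simp
  | succ n ih =>
      rw [List.take_add_one, List.range_succ, List.map_append, List.map_append,
        List.sum_append, List.sum_append, ih]
      cases h : l[n]? with
      | none => simp [List.getD, h]
      | some c => simp [List.getD, h]

theorem pvRowSums_getD (g : List String) (cols i : Nat) (hi : i < g.length) :
    (pvRowSums g cols).getD i 0
      = ((List.range cols).map (fun k => pvHash g i k)).sum := by
  unfold pvRowSums
  rw [List.getD_eq_getElem _ _ (by simpa using hi), List.getElem_map]
  rw [pvRow_take_eq]
  congr 1
  apply List.map_congr_left
  intro k _
  simp [pvHash, pvChAt, List.getD, List.getElem?_eq_getElem hi]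

theorem pvColSums_getD (g : List String) (rows cols j : Nat) (hj : j < cols) :
    (pvColSums g rows cols).getD j 0
      = ((List.range rows).map (fun k => pvHash g k j)).sum := by
  unfold pvColSums
  rw [PySem.List.getD_map_range _ _ _ _ hj]

-- pvDiagDR out of range is 0
theorem pvDiagDR_stop (g : List String) (rows cols k l : Nat) (h : ¬ (k < rows ∧ l < cols)) :
    pvDiagDR g rows cols k l = 0 := by
  rw [pvDiagDR]; simp [h]

theorem pvDiagDL_stop (g : List String) (rows cols : Nat) (k : Nat) (l : Int)
    (h : ¬ (k < rows ∧ 0 ≤ l)) : pvDiagDL g rows cols k l = 0 := by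
  rw [pvDiagDL]; simp [h]

-- the d1 table IS the table of pvDiagDR values
theorem pvD1From_eq (g : List String) (rows cols : Nat) :
    ∀ (n t : Nat), rows - t = n →
      pvD1From g rows cols t
        = (List.range' t n).map (fun r => (List.range cols).map (fun j => pvDiagDR g rows cols r j)) := by
  intro n
  induction n with
  | zero =>
      intro t ht
      rw [pvD1From]
      simp [show ¬ t < rows by omega]
  | succ n ih =>
      intro t ht
      have htr : t < rows := by omega
      rw [pvD1From]
      simp only [htr, dif_pos]
      rw [ih (t+1) (by omega), List.range'_succ]
      simp only [List.map_cons]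
      congr 1
      apply List.map_congr_left
      intro j hj
      have hjc : j < cols := List.mem_range.mp hj
      rw [pvDiagDR]
      simp only [htr, hjc, and_self, dif_pos]
      congr 1
      by_cases hr : t + 1 < rows
      · have hn : 0 < n := by omega
        obtain ⟨m, rfl⟩ := Nat.exists_eq_succ_of_ne_zero (by omega : n ≠ 0)
        rw [List.range'_succ]
        simp only [List.map_cons, List.headD_cons]
        by_cases hjc1 : j + 1 < cols
        · rw [List.getD_eq_getElem _ _ (by simpa using hjc1), List.getElem_map]
          simp
        · have : j + 1 = cols := by omega
          rw [List.getD_eq_default _ _ (by simpa using le_of_eq this.symm)]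
          rw [pvDiagDR_stop]; omega
      · have : n = 0 := by omega
        subst this
        simp only [List.range'_zero, List.map_nil, List.headD_nil]
        rw [List.getD_nil, pvDiagDR_stop]
        omega

-- the d2 table IS the table of pvDiagDL values
theorem pvD2From_eq (g : List String) (rows cols : Nat) :
    ∀ (n t : Nat), rows - t = n →
      pvD2From g rows cols t
        = (List.range' t n).map (fun r => (List.range cols).map (fun j : Nat => pvDiagDL g rows cols r ((j : Nat) : Int))) := by
  intro n
  induction n with
  | zero =>
      intro t ht
      rw [pvD2From]
      simp [show ¬ t < rows by omega]
  | succ n ih =>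
      intro t ht
      have htr : t < rows := by omega
      rw [pvD2From]
      simp only [htr, dif_pos]
      rw [ih (t+1) (by omega), List.range'_succ]
      simp only [List.map_cons]
      congr 1
      apply List.map_congr_left
      intro j hj
      have hjc : j < cols := List.mem_range.mp hj
      rw [pvDiagDL]
      simp only [htr, Int.natCast_nonneg, and_self, dif_pos, Int.toNat_natCast]
      congr 1
      by_cases hj0 : j = 0
      · subst hj0
        rw [if_pos rfl]
        exact (pvDiagDL_stop g rows cols (t+1) _ (by simp)).symm
      · simp only [if_neg hj0]
        have hcast : (j : Int) - 1 = ((j - 1 : Nat) : Int) := by omega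
        rw [hcast]
        by_cases hr : t + 1 < rows
        · have hn : 0 < n := by omega
          obtain ⟨m, rfl⟩ := Nat.exists_eq_succ_of_ne_zero (by omega : n ≠ 0)
          rw [List.range'_succ]
          simp only [List.map_cons, List.headD_cons]
          rw [List.getD_eq_getElem _ _ (by simp; omega), List.getElem_map]
          simp
        · have : n = 0 := by omega
          subst this
          simp only [List.range'_zero, List.map_nil, List.headD_nil]
          rw [List.getD_nil, pvDiagDL_stop]
          omega

-- per-cell: B's O(1) observed value equals A's rescanned observed value
theorem pvObserved_eq (g : List String) (i j : Nat)
    (hi : i < g.length) (hj : j < (g.headD "").length) :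
    (pvRowSums g (g.headD "").length).getD i 0
      + (pvColSums g g.length (g.headD "").length).getD j 0
      + ((pvD1From g g.length (g.headD "").length 0).getD i []).getD j 0
      + ((pvD2From g g.length (g.headD "").length 0).getD i []).getD j 0
      = pvObservedA g g.length (g.headD "").length i j := by
  rw [pvRowSums_getD g _ i hi, pvColSums_getD g _ _ j hj]
  rw [pvD1From_eq g _ _ g.length 0 rfl, pvD2From_eq g _ _ g.length 0 rfl]
  rw [← List.range_eq_range']
  rw [PySem.List.getD_map_range _ _ _ _ hi, PySem.List.getD_map_range _ _ _ _ hj]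
  rw [PySem.List.getD_map_range _ _ _ _ hi, PySem.List.getD_map_range _ _ _ _ hj]
  unfold pvObservedA
  ring

-- A's unguarded loop body, as a step over a dot position (proof helper)
def pvStepA' (g : List String) (rows cols : Nat) (s : Int × (Int × Int)) (ij : Nat × Nat) :
    Int × (Int × Int) :=
  let obs := pvObservedA g rows cols ij.1 ij.2
  if obs > s.1 then (obs, ((ij.2 : Int), (ij.1 : Int))) else s

theorem pvGetD_dot_mem (l : List Char) (j : Nat) (hc : l.getD j ' ' = '.') : '.' ∈ l := by
  unfold List.getD at hc
  cases h' : l[j]? with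
  | none => rw [h'] at hc; simp at hc
  | some c =>
      rw [h'] at hc
      simp at hc
      subst hc
      exact List.mem_of_getElem? h'

theorem pvChAt_ne_dot (g : List String) (i j : Nat)
    (h : '.' ∉ (g.getD i "").toList) : pvChAt g i j ≠ '.' := by
  intro hc
  exact h (pvGetD_dot_mem _ j (by unfold pvChAt at hc; exact hc))

-- A's guarded scan of row i equals the unguarded fold over that row's dot positions
theorem pvRowFold_eq (g : List String) (rows cols i : Nat) (s : Int × (Int × Int)) :
    (List.range cols).foldl (fun s j => pvStepA g rows cols s i j) s
      = (pvRowDots g cols i).foldl (fun s ij => pvStepA' g rows cols s ij) s := by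
  unfold pvRowDots
  by_cases hm : '.' ∈ (g.getD i "").toList
  · rw [if_pos hm, List.foldl_map, List.foldl_filter]
    apply PySem.List.foldl_congr_mem
    intro acc j _
    unfold pvStepA pvStepA'
    by_cases hc : pvChAt g i j = '.'
    · simp [hc]
    · simp [hc]
  · rw [if_neg hm]
    simp only [List.foldl_nil]
    rw [PySem.List.foldl_congr_mem _ _ (fun s _ => s) _
      (by intro acc j _; unfold pvStepA; simp [pvChAt_ne_dot g i j hm])]
    exact List.foldl_fixed _

-- A's whole double loop is the unguarded fold over all dot positions
theorem pvA_as_dots (g : List String) :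
    find_best_observation_point g
      = ((pvDots g g.length (g.headD "").length).foldl
          (fun s ij => pvStepA' g g.length (g.headD "").length s ij)
          ((0 : Int), ((0 : Int), (0 : Int)))).2 := by
  simp only [find_best_observation_point]
  unfold pvDots
  rw [List.foldl_flatMap]
  apply congrArg Prod.snd
  apply PySem.List.foldl_congr_mem
  intro acc i _
  exact pvRowFold_eq g g.length (g.headD "").length i acc

-- facts about a member of pvDots: its row index is in range and its column is in range
theorem pvDots_mem (g : List String) (rows cols : Nat) (ij : Nat × Nat)
    (h : ij ∈ pvDots g rows cols) : ij.1 < rows ∧ ij.2 < cols := by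
  unfold pvDots at h
  rcases List.mem_flatMap.mp h with ⟨i, hi, hmem⟩
  unfold pvRowDots at hmem
  by_cases hm : '.' ∈ (g.getD i "").toList
  · rw [if_pos hm] at hmem
    rcases List.mem_map.mp hmem with ⟨j, hj, rfl⟩
    exact ⟨List.mem_range.mp hi, List.mem_range.mp (List.mem_filter.mp hj).1⟩
  · rw [if_neg hm] at hmem
    exact absurd hmem (List.not_mem_nil)

-- ===== VERDICT (by name: the statement is the Claim_ definition above) =====
theorem find_best_observation_point_spec : Claim_equal_find_best_observation_point := by
  intro grid _hDom _hPre
  unfold Spec_find_best_observation_point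
  rw [pvA_as_dots]
  simp only [find_best_observation_point_alt]
  by_cases hd : (pvDots grid grid.length (grid.headD "").length).isEmpty
  · rw [if_pos hd, List.isEmpty_iff.mp hd]
    rfl
  · rw [if_neg hd]
    apply congrArg Prod.snd
    apply PySem.List.foldl_congr_mem
    intro acc ij hij
    obtain ⟨hi, hj⟩ := pvDots_mem grid _ _ ij hij
    unfold pvStepA'
    rw [pvObserved_eq grid ij.1 ij.2 hi hj]
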